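-- pv_equiv track=rewrite | github.com/jkulhanek/pubs | papers/plugs/texnote/texnote.py | concatenate_authors
-- ===== SOURCE A (Python) =====
-- def concatenate_authors(authors):
--     concatenated = ''
--     for a in range(len(authors)):
--         if len(authors) > 1 and a > 0:
--             if a == len(authors) - 1:
--                 concatenated += 'and '
--             else:
--                 concatenated += ', '
--         concatenated += authors[a]
--     return concatenated
-- ===== SOURCE B (Python) =====
-- def concatenate_authors(authors):
--     if not authors:
--         return ''
--     if len(authors) == 1:
--         return authors[0]
--     return ', '.join(authors[:-1]) + 'and ' + authors[-1]
-- ===== Notes on version B (the rewrite author's own statement) =====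
-- stated objective: simpler
-- what changed: Replaces A's index loop with per-position separator branching by guarded base cases plus a single ', '.join of all but the last author followed by 'and ' and the last author.
import Mathlib
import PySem

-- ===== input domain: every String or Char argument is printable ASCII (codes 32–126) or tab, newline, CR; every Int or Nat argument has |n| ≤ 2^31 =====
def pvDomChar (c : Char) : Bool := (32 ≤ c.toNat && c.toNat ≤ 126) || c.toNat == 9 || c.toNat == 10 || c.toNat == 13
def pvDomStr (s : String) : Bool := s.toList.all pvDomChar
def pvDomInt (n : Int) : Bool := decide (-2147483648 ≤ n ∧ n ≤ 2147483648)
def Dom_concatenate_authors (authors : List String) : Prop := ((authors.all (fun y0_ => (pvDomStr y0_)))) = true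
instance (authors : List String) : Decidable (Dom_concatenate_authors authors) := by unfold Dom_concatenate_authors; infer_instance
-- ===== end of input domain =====

-- B replaces A's index loop with per-position separator branching by guarded base
-- cases plus a single ", "-join of all but the last author, then "and " and the
-- last author (objective: simpler).


-- ===== PORT A =====
-- literal port of A: a fold over range(len(authors)) that prepends 'and ' / ', '
-- to the accumulator at the appropriate indices (indices are always in range, so
-- pyGetD with default "" is exact).
def concatenate_authors (authors : List String) : String :=
  (PySem.List.pyRange 0 (authors.length : Int) 1).foldl
    (fun concatenated a =>
      (if (authors.length : Int) > 1 ∧ a > 0 then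
        (if a = (authors.length : Int) - 1 then concatenated ++ "and "
         else concatenated ++ ", ")
       else concatenated) ++ PySem.List.pyGetD authors a "")
    ""

-- ===== PORT B =====
-- literal port of Source B: guard empty and singleton lists, else
-- ', '.join(authors[:-1]) + 'and ' + authors[-1]
def concatenate_authors_alt (authors : List String) : String :=
  if authors.length = 0 then ""
  else if authors.length = 1 then PySem.List.pyGetD authors 0 ""
  else PySem.Str.join ", " (PySem.List.slice authors none (some (-1)))
        ++ "and " ++ PySem.List.pyGetD authors (-1) ""

-- ===== PRECONDITION & SPEC =====
def Spec_concatenate_authors (authors : List String) (out : String) : Prop := out = concatenate_authors_alt authors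
instance (authors : List String) (out : String) : Decidable (Spec_concatenate_authors authors out) := by unfold Spec_concatenate_authors; infer_instance

-- ===== CLAIM (what is proved, stated in full; the proofs are below) =====
def Claim_equal_concatenate_authors : Prop := ∀ (authors : List String), Dom_concatenate_authors authors → Spec_concatenate_authors authors (concatenate_authors authors)

-- ===== LEMMAS AND PROOFS =====

-- A's loop over the first m indices (m strictly below the last index never fires
-- the 'and ' branch) builds exactly the ", "-join of the first m authors.
lemma concA_prefix (xs : List String) (m : Nat) (hm : m < xs.length) :
    (PySem.List.pyRange 0 (m : Int) 1).foldl
      (fun concatenated a =>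
        (if (xs.length : Int) > 1 ∧ a > 0 then
          (if a = (xs.length : Int) - 1 then concatenated ++ "and "
           else concatenated ++ ", ")
         else concatenated) ++ PySem.List.pyGetD xs a "")
      ""
    = PySem.Str.join ", " (xs.take m) := by
  induction m with
  | zero =>
      rw [PySem.List.pyRange_one_eq_nil (by norm_num)]
      simp [PySem.Str.join, PySem.Chars.join_nil]
  | succ m ih =>
      have hm' : m < xs.length := Nat.lt_of_succ_lt hm
      have hcast : ((m + 1 : Nat) : Int) = (m : Int) + 1 := by push_cast; ring
      rw [hcast, PySem.List.pyRange_one_succ_right (by positivity),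
          List.foldl_append, ih hm']
      simp only [List.foldl_cons, List.foldl_nil]
      have hne : (m : Int) ≠ (xs.length : Int) - 1 := by
        have : m + 1 < xs.length := hm
        omega
      apply String.toList_inj.mp
      by_cases h0 : m = 0
      · subst h0
        simp [PySem.Str.toList_join, String.toList_append]
        rcases xs with _ | ⟨x, xs⟩
        · simp at hm
        · simp [PySem.Chars.join_singleton, PySem.List.pyGetD_zero_cons]
      · have h1 : (xs.length : Int) > 1 := by omega
        have h0' : (0 : Int) < (m : Int) := by exact_mod_cast Nat.pos_of_ne_zero h0
        simp only [h1, h0', and_true, if_pos, hne, if_false,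
          String.toList_append, PySem.Str.toList_join]
        -- join sep (parts ++ [p]) = join sep parts ++ sep ++ p for nonempty parts
        have hjoin : ∀ (parts : List (List Char)) (p : List Char), parts ≠ [] →
            PySem.Chars.join (", ".toList) (parts ++ [p])
              = PySem.Chars.join (", ".toList) parts ++ ", ".toList ++ p := by
          intro parts
          induction parts with
          | nil => intro p h; exact absurd rfl h
          | cons q rest ihp =>
              intro p _
              rcases rest with _ | ⟨r, rest⟩
              · simp [PySem.Chars.join_cons_cons, PySem.Chars.join_singleton]
              · rw [List.cons_append, List.cons_append, PySem.Chars.join_cons_cons,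
                    PySem.Chars.join_cons_cons, ← List.cons_append, ihp p (by simp)]
                simp [List.append_assoc]
        have htake : xs.take (m + 1) = xs.take m ++ [xs[m]] :=
          List.take_succ_eq_append_getElem hm'
        rw [htake, List.map_append, List.map_singleton,
            hjoin _ _ (by
              have hxs : xs ≠ [] := by intro h; rw [h] at hm'; simp at hm'
              simp [List.take_eq_nil_iff, hxs]; omega)]
        have hget : PySem.List.pyGetD xs (m : Int) "" = xs[m] := by
          simp [PySem.List.pyGetD_natCast, List.getD_eq_getElem?_getD,
            List.getElem?_eq_getElem hm']
        rw [hget]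

theorem concatenate_authors_spec : Claim_equal_concatenate_authors := by
  intro authors _
  unfold Spec_concatenate_authors concatenate_authors concatenate_authors_alt
  by_cases h0 : authors.length = 0
  · rw [PySem.List.pyRange_one_eq_nil (by simp [h0])]
    simp [h0]
  · by_cases h1 : authors.length = 1
    · obtain ⟨x, hx⟩ := List.length_eq_one_iff.mp h1
      subst hx
      norm_num [PySem.List.pyRange_one, PySem.List.pyGetD_zero_cons,
        String.empty_append]
    · have hlen2 : 2 ≤ authors.length := by omega
      have hcast : ((authors.length : Nat) : Int) = ((authors.length - 1 : Nat) : Int) + 1 := by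
        omega
      rw [show PySem.List.pyRange 0 ((authors.length : Nat) : Int) 1
            = PySem.List.pyRange 0 (((authors.length - 1 : Nat) : Int) + 1) 1 from by
              rw [← hcast],
          PySem.List.pyRange_one_succ_right (by positivity), List.foldl_append,
          concA_prefix authors (authors.length - 1) (by omega)]
      simp only [List.foldl_cons, List.foldl_nil]
      have hg1 : ((authors.length : Nat) : Int) > 1 := by omega
      have hg0 : (0 : Int) < ((authors.length - 1 : Nat) : Int) := by omega
      have heq : ((authors.length - 1 : Nat) : Int) = ((authors.length : Nat) : Int) - 1 := by omega
      simp only [hg1, if_pos, heq]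
      have hne : authors ≠ [] := by intro h; rw [h] at h0; simp at h0
      rw [PySem.List.slice_to_neg_one, PySem.List.pyGetD_neg_one _ _ hne,
          List.dropLast_eq_take]
      have hget : PySem.List.pyGetD authors (((authors.length : Nat) : Int) - 1) ""
          = authors.getLast hne := by
        rw [← heq]
        simp [PySem.List.pyGetD_natCast, List.getD_eq_getElem?_getD,
          List.getElem?_eq_getElem (by omega : authors.length - 1 < authors.length),
          List.getLast_eq_getElem]
      rw [hget]
      simp [h0, h1]
      intro h
      exact absurd h (by omega)
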